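-- pv_equiv track=rewrite | github.com/pumbahk/altair | ticketing/src/altair/app/ticketing/tickets/preview/merging.py | _remove_empty_values_from_mapping
-- ===== SOURCE A (Python) =====
-- def _remove_empty_values_from_mapping(mapping):
--     dels = []
--     for k in mapping:
--         if not mapping[k]:
--             dels.append(k)
--     for k in dels:
--         del mapping[k]
--     return mapping
-- ===== SOURCE B (Python) =====
-- def _remove_empty_values_from_mapping(mapping):
--     kept = {k: v for k, v in mapping.items() if v}
--     mapping.clear()
--     mapping.update(kept)
--     return mapping
-- ===== Notes on version B (the rewrite author's own statement) =====
-- stated objective: simpler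
-- what changed: Replaces the two-phase collect-falsy-keys-then-delete-each loop with a single comprehension that keeps truthy items, then rebuilds the dict in place via clear()+update(), preserving order and identity.
import Mathlib
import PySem

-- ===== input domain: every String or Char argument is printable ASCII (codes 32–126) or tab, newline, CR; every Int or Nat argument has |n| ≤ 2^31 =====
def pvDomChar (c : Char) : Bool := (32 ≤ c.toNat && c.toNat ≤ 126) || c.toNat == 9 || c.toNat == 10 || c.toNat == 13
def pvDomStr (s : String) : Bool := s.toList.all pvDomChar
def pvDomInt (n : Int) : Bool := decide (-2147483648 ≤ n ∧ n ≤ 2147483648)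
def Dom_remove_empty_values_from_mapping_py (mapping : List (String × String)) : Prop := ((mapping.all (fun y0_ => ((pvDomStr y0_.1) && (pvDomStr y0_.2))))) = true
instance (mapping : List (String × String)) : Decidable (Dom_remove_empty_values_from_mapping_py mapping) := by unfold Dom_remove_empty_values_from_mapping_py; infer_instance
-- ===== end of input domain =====

-- B rebuilds the dict in place from a truthy-items comprehension instead of A's
-- collect-keys-then-delete two-phase loop (objective: simpler). Both A and B mutate the
-- argument dict in place the same way; the theorems below are about the returned mapping.

-- ===== PORT A =====
-- mapping[k]: first-match lookup; for k taken from mapping itself it always succeeds,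
-- so the `getD ""` default is never used.
def pyLookup (m : List (String × String)) (k : String) : String :=
  ((m.find? (fun q => q.1 == k)).map Prod.snd).getD ""

-- del mapping[k]: remove the entry with key k (unique under Pre_)
def pyDelKey (m : List (String × String)) (k : String) : List (String × String) :=
  m.eraseP (fun q => q.1 == k)

def remove_empty_values_from_mapping_py (mapping : List (String × String)) : List (String × String) :=
  let dels := mapping.foldl (fun acc p => if pyLookup mapping p.1 == "" then acc ++ [p.1] else acc) []
  dels.foldl (fun m k => pyDelKey m k) mapping

-- ===== PORT B =====
def remove_empty_values_from_mapping_py_alt (mapping : List (String × String)) : List (String × String) :=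
  let kept := mapping.filter (fun p => !(p.2 == ""))
  kept  -- clear() + update(kept) leaves exactly kept in the mapping

-- ===== PRECONDITION & SPEC =====
-- A's argument is a Python dict, whose keys are necessarily distinct; an association list
-- with duplicate keys does not represent any dict input, so Pre_ requires distinct keys.
def Pre_remove_empty_values_from_mapping_py (mapping : List (String × String)) : Prop :=
  (mapping.map Prod.fst).Nodup
instance (mapping : List (String × String)) : Decidable (Pre_remove_empty_values_from_mapping_py mapping) := by unfold Pre_remove_empty_values_from_mapping_py; infer_instance

def pvWitness_remove_empty_values_from_mapping_py : (List (String × String)) :=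
  [("a", ""), ("b", "x"), ("c", ""), ("d", "y")]

def Spec_remove_empty_values_from_mapping_py (mapping : List (String × String)) (out : List (String × String)) : Prop := out = remove_empty_values_from_mapping_py_alt mapping
instance (mapping : List (String × String)) (out : List (String × String)) : Decidable (Spec_remove_empty_values_from_mapping_py mapping out) := by unfold Spec_remove_empty_values_from_mapping_py; infer_instance

-- ===== CLAIM (what is proved, stated in full; the proofs are below) =====
def Claim_equal_remove_empty_values_from_mapping_py : Prop := ∀ (mapping : List (String × String)), Dom_remove_empty_values_from_mapping_py mapping → Pre_remove_empty_values_from_mapping_py mapping → Spec_remove_empty_values_from_mapping_py mapping (remove_empty_values_from_mapping_py mapping)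

-- ===== LEMMAS AND PROOFS =====

-- With k not among t's keys, filtering k's entries away is the identity.
theorem filter_ne_of_not_mem (t : List (String × String)) (k : String)
    (h : k ∉ t.map Prod.fst) : t.filter (fun q => !(q.1 == k)) = t := by
  apply List.filter_eq_self.2
  intro p hp
  simp only [Bool.not_eq_eq_eq_not, Bool.not_true, beq_eq_false_iff_ne, ne_eq]
  intro hk
  exact h (List.mem_map.2 ⟨p, hp, hk⟩)

-- Under distinct keys, deleting key k is the same as filtering it out everywhere.
theorem pyDelKey_eq_filter (m : List (String × String)) (k : String)
    (h : (m.map Prod.fst).Nodup) :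
    pyDelKey m k = m.filter (fun q => !(q.1 == k)) := by
  induction m with
  | nil => rfl
  | cons p t ih =>
    simp only [List.map_cons, List.nodup_cons] at h
    by_cases hk : p.1 = k
    · simp [pyDelKey, hk, filter_ne_of_not_mem t k (hk ▸ h.1)]
    · simpa [pyDelKey, List.eraseP_cons, hk] using ih h.2

-- Filtering preserves key-distinctness.
theorem nodup_keys_filter (m : List (String × String)) (P : String × String → Bool)
    (h : (m.map Prod.fst).Nodup) : ((m.filter P).map Prod.fst).Nodup :=
  (((m.filter_sublist (p := P)).map Prod.fst).nodup h)

-- Deleting a list of keys one by one filters out all of them.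
theorem foldl_del_eq_filter (ks : List String) (m : List (String × String))
    (h : (m.map Prod.fst).Nodup) :
    ks.foldl (fun m k => pyDelKey m k) m = m.filter (fun p => !(decide (p.1 ∈ ks))) := by
  induction ks generalizing m with
  | nil => simp
  | cons k ks ih =>
    rw [List.foldl_cons, pyDelKey_eq_filter m k h,
        ih _ (nodup_keys_filter m _ h), List.filter_filter]
    apply List.filter_congr
    intro p _
    by_cases h1 : p.1 = k <;> simp [h1]

-- In a distinct-keyed list, looking up an element's own key gives its value.
theorem pyLookup_self (m : List (String × String)) (p : String × String)
    (h : (m.map Prod.fst).Nodup) (hp : p ∈ m) : pyLookup m p.1 = p.2 := by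
  induction m with
  | nil => cases hp
  | cons q t ih =>
    simp only [List.map_cons, List.nodup_cons] at h
    rcases List.mem_cons.1 hp with rfl | hpt
    · simp [pyLookup]
    · have hne : ¬ (q.1 == p.1) = true := by
        simp only [beq_iff_eq]
        intro he
        exact h.1 (List.mem_map.2 ⟨p, hpt, he.symm⟩)
      simpa [pyLookup, List.find?_cons, hne] using ih h.2 hpt

-- Membership of an entry's key in the collected deletion keys decides its value's emptiness.
theorem mem_dels_iff (m : List (String × String)) (p : String × String)
    (h : (m.map Prod.fst).Nodup) (hp : p ∈ m) :
    p.1 ∈ (m.filter (fun q => pyLookup m q.1 == "")).map Prod.fst ↔ p.2 = "" := by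
  constructor
  · intro hmem
    rcases List.mem_map.1 hmem with ⟨q, hq, hk⟩
    rcases List.mem_filter.1 hq with ⟨hqm, hqv⟩
    have hq2 : q.2 = "" := by simpa [pyLookup_self m q h hqm] using hqv
    -- q and p share a key in a nodup-keyed list, hence q = p
    have : q = p := by
      have := List.nodup_iff_injective_getElem.1 h
      rcases List.mem_iff_getElem.1 hqm with ⟨i, hi, hqi⟩
      rcases List.mem_iff_getElem.1 hp with ⟨j, hj, hpj⟩
      have hij : (⟨i, by simpa using hi⟩ : Fin (m.map Prod.fst).length) = ⟨j, by simpa using hj⟩ := by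
        apply this
        simpa [hqi, hpj] using hk
      rw [← hqi, ← hpj]
      simp only [Fin.mk.injEq] at hij
      congr 1
    rw [← this, hq2]
  · intro hv
    exact List.mem_map.2 ⟨p, List.mem_filter.2 ⟨hp, by simp [pyLookup_self m p h hp, hv]⟩, rfl⟩

-- ===== VERDICT (by name: the statement is the Claim_ definition above) =====
theorem remove_empty_values_from_mapping_py_spec : Claim_equal_remove_empty_values_from_mapping_py := by
  intro mapping _ hpre
  unfold Spec_remove_empty_values_from_mapping_py
  unfold remove_empty_values_from_mapping_py remove_empty_values_from_mapping_py_alt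
  simp only
  rw [PySem.List.foldl_append_if (fun p => pyLookup mapping p.1 == "") Prod.fst]
  rw [List.nil_append, foldl_del_eq_filter _ _ hpre]
  apply List.filter_congr
  intro p hp
  have := mem_dels_iff mapping p hpre hp
  by_cases hv : p.2 = ""
  · simp [hv, this.2 hv]
  · have hnm : p.1 ∉ List.map Prod.fst (List.filter (fun q => pyLookup mapping q.1 == "") mapping) :=
      fun hmem => hv (this.1 hmem)
    simp [hnm, hv]
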